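-- pv_equiv track=rewrite | github.com/sofia-dominguezc/NonAcademic | python_files/older_files/Data_structures.py | perms_rots_to_compr
-- ===== SOURCE A (Python) =====
-- def perms_rots_to_compr(perms, rots):
--     """Given the iterables of perms and rots, returns a compressed cube"""
--     # compress the rotations as a 7-digit number in base 3
--     rots_compr = 0  # number between 0 and 2186
--     for i, r in enumerate(rots):
--         rots_compr += r * 3**i
--     # compress the permutation as a 7-digit number in base 7
--     perms_compr = 0  # number between 0 and 823542
--     for i, p in enumerate(perms):
--         perms_compr += p * 7**i
--     return (perms_compr, rots_compr)
-- ===== SOURCE B (Python) =====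
-- def perms_rots_to_compr(perms, rots):
--     """Given the iterables of perms and rots, returns a compressed cube"""
--     ps = list(perms)
--     rs = list(rots)
--     perms_compr = 0
--     for d in reversed(ps):
--         perms_compr = perms_compr * 7 + d
--     rots_compr = 0
--     for d in reversed(rs):
--         rots_compr = rots_compr * 3 + d
--     return (perms_compr, rots_compr)
-- ===== Notes on version B (the rewrite author's own statement) =====
-- stated objective: faster
-- what changed: Replaces the index-weighted sums (digit * base**i via enumerate) by Horner evaluation over the reversed list with a single acc = acc*base + digit accumulator, eliminating the base**i big-integer power computed per element.
import Mathlib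
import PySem

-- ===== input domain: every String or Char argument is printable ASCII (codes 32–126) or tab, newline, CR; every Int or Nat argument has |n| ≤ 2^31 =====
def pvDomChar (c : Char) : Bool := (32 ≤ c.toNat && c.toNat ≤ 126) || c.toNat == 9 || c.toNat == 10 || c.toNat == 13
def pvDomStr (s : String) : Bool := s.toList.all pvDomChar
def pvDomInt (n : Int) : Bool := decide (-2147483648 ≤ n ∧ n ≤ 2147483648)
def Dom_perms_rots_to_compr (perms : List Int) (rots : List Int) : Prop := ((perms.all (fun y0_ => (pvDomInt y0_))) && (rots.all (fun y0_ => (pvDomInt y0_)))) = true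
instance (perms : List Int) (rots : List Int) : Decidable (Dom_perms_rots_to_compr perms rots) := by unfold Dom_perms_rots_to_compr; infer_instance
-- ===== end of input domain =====

-- ===== PORT A =====
-- Port of A: enumerate-indexed sums acc + digit * base**i.
def perms_rots_to_compr (perms : List Int) (rots : List Int) : Int × Int :=
  let rots_compr : Int :=
    (PySem.List.enumerate rots).foldl (fun acc p => acc + p.2 * (3:Int) ^ p.1.toNat) 0
  let perms_compr : Int :=
    (PySem.List.enumerate perms).foldl (fun acc p => acc + p.2 * (7:Int) ^ p.1.toNat) 0
  (perms_compr, rots_compr)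

-- ===== PORT B =====
-- Port of B: Horner evaluation over the reversed list, acc = acc*base + digit.
def perms_rots_to_compr_alt (perms : List Int) (rots : List Int) : Int × Int :=
  let perms_compr : Int := perms.reverse.foldl (fun acc d => acc * 7 + d) 0
  let rots_compr : Int := rots.reverse.foldl (fun acc d => acc * 3 + d) 0
  (perms_compr, rots_compr)

-- ===== PRECONDITION & SPEC =====
def Spec_perms_rots_to_compr (perms : List Int) (rots : List Int) (out : Int × Int) : Prop := out = perms_rots_to_compr_alt perms rots
instance (perms : List Int) (rots : List Int) (out : Int × Int) : Decidable (Spec_perms_rots_to_compr perms rots out) := by unfold Spec_perms_rots_to_compr; infer_instance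

-- ===== CLAIM (what is proved, stated in full; the proofs are below) =====
def Claim_equal_perms_rots_to_compr : Prop := ∀ (perms : List Int) (rots : List Int), Dom_perms_rots_to_compr perms rots → Spec_perms_rots_to_compr perms rots (perms_rots_to_compr perms rots)

-- ===== LEMMAS AND PROOFS =====

-- A's indexed sum, with general start index and accumulator, equals acc + b^n * (Horner value).
theorem pv_sumE (b : Int) : ∀ (l : List Int) (n : Nat) (acc : Int),
    (PySem.List.enumerate l (n : Int)).foldl (fun a p => a + p.2 * b ^ p.1.toNat) acc
      = acc + b ^ n * l.foldr (fun d a => a * b + d) 0 := by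
  intro l
  induction l with
  | nil => intro n acc; simp [PySem.List.enumerate_nil]
  | cons d t ih =>
    intro n acc
    rw [PySem.List.enumerate_cons, List.foldl_cons]
    have h1 : ((n : Int) + 1) = ((n + 1 : Nat) : Int) := by push_cast; ring
    rw [h1, ih (n + 1)]
    simp only [List.foldr_cons, Int.toNat_natCast, pow_succ]
    ring

theorem pv_horner (b : Int) (l : List Int) :
    l.reverse.foldl (fun acc d => acc * b + d) 0
      = (PySem.List.enumerate l).foldl (fun a p => a + p.2 * b ^ p.1.toNat) 0 := by
  rw [List.foldl_reverse]
  have h := pv_sumE b l 0 0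
  simp only [Nat.cast_zero, pow_zero, one_mul, zero_add] at h
  exact h.symm

-- ===== VERDICT (by name: the statement is the Claim_ definition above) =====
theorem perms_rots_to_compr_spec : Claim_equal_perms_rots_to_compr := by
  intro perms rots _
  unfold Spec_perms_rots_to_compr perms_rots_to_compr perms_rots_to_compr_alt
  rw [pv_horner 7 perms, pv_horner 3 rots]
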